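-- pv_equiv track=rewrite | github.com/sebastian221-art/BELLADONNA | capacidades/busqueda_conocimiento.py | sintetizar
-- ===== SOURCE A (Python) =====
-- def sintetizar(texto, max_palabras=100):
--     """
--     Sintetiza un texto largo en resumen corto.
--     """
--     if not texto:
--         return ""
--
--     # Divide en oraciones
--     oraciones = texto.split('. ')
--
--     # Toma las primeras oraciones hasta el límite
--     resumen = []
--     palabras_actuales = 0
--
--     for oracion in oraciones:
--         palabras = len(oracion.split())
--         if palabras_actuales + palabras <= max_palabras:
--             resumen.append(oracion)
--             palabras_actuales += palabras
--         else:
--             break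
--
--     return '. '.join(resumen) + '.'
-- ===== SOURCE B (Python) =====
-- def sintetizar(texto, max_palabras=100):
--     """
--     Sintetiza un texto largo en resumen corto.
--     """
--     if not texto:
--         return ""
--     oraciones = texto.split('. ')
--     # prefix sums of word counts
--     cums = []
--     total = 0
--     for o in oraciones:
--         total += len(o.split())
--         cums.append(total)
--     # counts are non-negative, so cums is non-decreasing: the sentences whose
--     # cumulative word count fits are exactly a leading slice
--     n = sum(1 for c in cums if c <= max_palabras)
--     return '. '.join(oraciones[:n]) + '.'
-- ===== Notes on version B (the rewrite author's own statement) =====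
-- stated objective: idiomatic
-- what changed: Instead of A's single loop that accumulates selected sentences and a running word total with a break, B precomputes the prefix sums of word counts, counts how many fit the limit (a prefix, since counts are non-negative), and slices-and-joins the sentence list.
import Mathlib
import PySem

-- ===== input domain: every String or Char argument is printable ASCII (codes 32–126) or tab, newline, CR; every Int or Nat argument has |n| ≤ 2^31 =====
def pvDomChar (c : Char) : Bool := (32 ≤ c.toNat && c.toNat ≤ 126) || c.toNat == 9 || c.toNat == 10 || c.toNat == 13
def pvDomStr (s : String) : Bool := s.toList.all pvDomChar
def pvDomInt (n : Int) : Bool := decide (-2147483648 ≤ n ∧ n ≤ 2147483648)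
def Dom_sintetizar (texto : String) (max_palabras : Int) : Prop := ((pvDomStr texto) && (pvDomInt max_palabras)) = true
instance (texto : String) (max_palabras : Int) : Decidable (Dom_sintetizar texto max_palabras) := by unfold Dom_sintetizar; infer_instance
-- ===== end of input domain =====

-- B replaces A's accumulate-with-break loop by prefix sums of word counts,
-- a count of the fitting prefix, and a slice-and-join (idiomatic, same cost).

-- ===== PORT A =====
-- A's for-loop with break: state (resumen, palabras_actuales)
def pvLoopA (max_palabras : Int) : List (List Char) → List (List Char) → Int → List (List Char)
  | [], resumen, _ => resumen
  | o :: rest, resumen, pal =>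
      let palabras : Int := ((PySem.Chars.split₀ o).length : Int)
      if pal + palabras ≤ max_palabras then
        pvLoopA max_palabras rest (resumen ++ [o]) (pal + palabras)
      else
        resumen

def sintetizar (texto : String) (max_palabras : Int) : String :=
  if texto == "" then ""
  else
    let oraciones := PySem.Chars.splitOn texto.toList ". ".toList
    String.ofList (PySem.Chars.join ". ".toList (pvLoopA max_palabras oraciones [] 0) ++ ['.'])

-- ===== PORT B =====
-- running prefix sums of word counts (B's `for o in oraciones: total += …; cums.append(total)`)
def pvCums (total : Int) : List (List Char) → List Int
  | [] => []
  | o :: rest =>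
      let total' := total + ((PySem.Chars.split₀ o).length : Int)
      total' :: pvCums total' rest

def sintetizar_alt (texto : String) (max_palabras : Int) : String :=
  if texto == "" then ""
  else
    let oraciones := PySem.Chars.splitOn texto.toList ". ".toList
    let cums := pvCums 0 oraciones
    let n := (cums.filter (fun c => decide (c ≤ max_palabras))).length
    String.ofList (PySem.Chars.join ". ".toList (oraciones.take n) ++ ['.'])

-- ===== PRECONDITION & SPEC =====
def Spec_sintetizar (texto : String) (max_palabras : Int) (out : String) : Prop := out = sintetizar_alt texto max_palabras
instance (texto : String) (max_palabras : Int) (out : String) : Decidable (Spec_sintetizar texto max_palabras out) := by unfold Spec_sintetizar; infer_instance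

-- ===== CLAIM (what is proved, stated in full; the proofs are below) =====
def Claim_equal_sintetizar : Prop := ∀ (texto : String) (max_palabras : Int), Dom_sintetizar texto max_palabras → Spec_sintetizar texto max_palabras (sintetizar texto max_palabras)

-- ===== LEMMAS AND PROOFS =====

-- every prefix sum starting at t is ≥ t (word counts are non-negative)
theorem pvCums_ge (os : List (List Char)) : ∀ t : Int, ∀ c ∈ pvCums t os, t ≤ c := by
  induction os with
  | nil => intro t c hc; simp [pvCums] at hc
  | cons o rest ih =>
      intro t c hc
      have h0 : (0:Int) ≤ ((PySem.Chars.split₀ o).length : Int) := Int.natCast_nonneg _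
      simp only [pvCums, List.mem_cons] at hc
      rcases hc with h | h
      · omega
      · have := ih (t + ((PySem.Chars.split₀ o).length : Int)) c h
        omega

-- A's loop selects exactly the sentences whose prefix sum fits the limit
theorem pvLoopA_eq_take (max_palabras : Int) (os : List (List Char)) :
    ∀ (acc : List (List Char)) (pal : Int),
      pvLoopA max_palabras os acc pal =
        acc ++ os.take ((pvCums pal os).filter (fun c => decide (c ≤ max_palabras))).length := by
  induction os with
  | nil => intro acc pal; simp [pvLoopA, pvCums]
  | cons o rest ih =>
      intro acc pal
      simp only [pvLoopA, pvCums]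
      by_cases h : pal + ((PySem.Chars.split₀ o).length : Int) ≤ max_palabras
      · simp only [h, if_pos, List.filter_cons]
        rw [ih]
        simp [List.take_succ_cons]
      · have hfilter :
            ((pvCums (pal + ((PySem.Chars.split₀ o).length : Int)) rest).filter
              (fun c => decide (c ≤ max_palabras))) = [] := by
          rw [List.filter_eq_nil_iff]
          intro c hc
          have := pvCums_ge rest (pal + ((PySem.Chars.split₀ o).length : Int)) c hc
          simp; omega
        simp [h, hfilter]

-- ===== VERDICT (by name: the statement is the Claim_ definition above) =====
theorem sintetizar_spec : Claim_equal_sintetizar := by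
  intro texto max_palabras _
  unfold Spec_sintetizar sintetizar sintetizar_alt
  by_cases h : texto == ""
  · simp [h]
  · simp only [h, Bool.false_eq_true, if_false]
    rw [pvLoopA_eq_take]
    simp
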